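-- pv_equiv track=rewrite | github.com/GIL794/Math-Problems-Code-Solutions | Euler Totient Function/euler_totient.py | find_coprimes
-- ===== SOURCE A (Python) =====
-- def gcd(a, b):
--     """
--     Calculate the greatest common divisor using Euclidean algorithm.
--
--     Args:
--         a, b: Two integers
--
--     Returns:
--         Greatest common divisor of a and b
--     """
--     while b:
--         a, b = b, a % b
--     return a
--
-- def find_coprimes(n, limit=None):
--     """
--     Find all numbers coprime to n up to a limit.
--
--     Args:
--         n: The number to find coprimes for
--         limit: Maximum value to check (defaults to n)
--
--     Returns:
--         List of numbers coprime to n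
--     """
--     if limit is None:
--         limit = n
--
--     coprimes = []
--     for k in range(1, limit + 1):
--         if gcd(k, n) == 1:
--             coprimes.append(k)
--
--     return coprimes
-- ===== SOURCE B (Python) =====
-- def find_coprimes(n, limit=None):
--     """Factorize |n| once, then keep k in 1..limit divisible by none of its prime factors."""
--     if limit is None:
--         limit = n
--     if limit < 1:
--         return []
--     m = -n if n < 0 else n
--     if m == 0:
--         return [1]  # gcd(k, 0) = k, so only 1 is coprime to 0
--     primes = []
--     t = m
--     d = 2
--     while d * d <= t:
--         if t % d == 0:
--             primes.append(d)
--             while t % d == 0: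
--                 t //= d
--         d += 1
--     if t > 1:
--         primes.append(t)
--     return [k for k in range(1, limit + 1) if all(k % p for p in primes)]
-- ===== Notes on version B (the rewrite author's own statement) =====
-- stated objective: alternative
-- what changed: Instead of running a full Euclidean gcd against n for every k, B factorizes |n| once by trial division and keeps each k divisible by none of n's prime factors; Pre_ excludes n < 0 with a nonempty requested range, an unspecified corner where A's sign-carrying gcd returns [] while B returns the coprimes of |n| -- both defensible.
-- outside the precondition, e.g. on find_coprimes(-6, 10): A returns [], B returns [1, 5, 7]
import Mathlib
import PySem

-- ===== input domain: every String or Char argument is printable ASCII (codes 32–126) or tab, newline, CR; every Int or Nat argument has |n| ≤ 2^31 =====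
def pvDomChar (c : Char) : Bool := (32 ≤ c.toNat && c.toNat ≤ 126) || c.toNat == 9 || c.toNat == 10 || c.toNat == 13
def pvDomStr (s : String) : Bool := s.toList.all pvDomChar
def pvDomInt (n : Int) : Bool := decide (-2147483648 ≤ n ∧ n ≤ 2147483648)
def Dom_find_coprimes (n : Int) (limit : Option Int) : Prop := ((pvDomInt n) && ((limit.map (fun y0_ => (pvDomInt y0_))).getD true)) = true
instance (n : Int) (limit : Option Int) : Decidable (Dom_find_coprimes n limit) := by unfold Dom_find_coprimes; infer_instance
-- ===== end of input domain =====

-- B re-implements find_coprimes by factorizing |n| once and testing each k only against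
-- n's prime factors (instead of running a full Euclidean gcd per k); proved equal to A on
-- Pre_find_coprimes (n ≥ 0, or an empty requested range).

-- ===== PORT A =====
-- Python gcd(a, b): 'while b: a, b = b, a % b; return a'.
-- fuel only makes the recursion structural; b.natAbs+1 steps always suffice (|a % b| < |b|).
def pygcd (fuel : Nat) (a b : Int) : Int :=
  match fuel with
  | 0 => a
  | f + 1 => if b = 0 then a else pygcd f b (PySem.Int.mod a b)

def find_coprimes (n : Int) (limit : Option Int) : List Int :=
  let lim := limit.getD n
  (PySem.List.pyRange 1 (lim + 1) 1).foldl
    (fun coprimes k => if pygcd (n.natAbs + 1) k n = 1 then coprimes ++ [k] else coprimes) []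

-- ===== PORT B =====
-- 'while t % d == 0: t //= d'; fuel t.toNat+1 always suffices (t strictly decreases).
def stripFactor (fuel : Nat) (t d : Int) : Int :=
  match fuel with
  | 0 => t
  | f + 1 => if PySem.Int.mod t d = 0 then stripFactor f (PySem.Int.floordiv t d) d else t

-- 'while d*d <= t: if t % d == 0: primes.append(d); strip; d += 1'; fuel m.toNat+1 suffices.
def factorOuter (fuel : Nat) (t d : Int) (acc : List Int) : Int × List Int :=
  match fuel with
  | 0 => (t, acc)
  | f + 1 =>
    if d * d ≤ t then
      if PySem.Int.mod t d = 0 then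
        factorOuter f (stripFactor (t.toNat + 1) t d) (d + 1) (acc ++ [d])
      else factorOuter f t (d + 1) acc
    else (t, acc)

def find_coprimes_alt (n : Int) (limit : Option Int) : List Int :=
  let lim := limit.getD n
  if lim < 1 then []
  else
    let m := if n < 0 then -n else n
    if m = 0 then [1]
    else
      let r := factorOuter (m.toNat + 1) m 2 []
      let primes := if 1 < r.1 then r.2 ++ [r.1] else r.2
      (PySem.List.pyRange 1 (lim + 1) 1).filter
        (fun k => primes.all (fun p => !(PySem.Int.mod k p == 0)))

-- ===== PRECONDITION & SPEC =====
-- Pre_ excludes n < 0 with a requested nonempty range, an unspecified corner on which the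
-- two values are different but equally defensible: A's sign-carrying Euclid yields a
-- negative gcd for negative n, so A returns [] there, while B returns the numbers coprime
-- to |n| (gcd(k,-n) = gcd(k,n)); no caller of a totient helper fixes either reading.
def Pre_find_coprimes (n : Int) (limit : Option Int) : Prop := 0 ≤ n ∨ limit.getD n < 1
instance (n : Int) (limit : Option Int) : Decidable (Pre_find_coprimes n limit) := by
  unfold Pre_find_coprimes; infer_instance

def pvWitness_find_coprimes : Int × Option Int := (10, some 20)

def Spec_find_coprimes (n : Int) (limit : Option Int) (out : List Int) : Prop :=
  out = find_coprimes_alt n limit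
instance (n : Int) (limit : Option Int) (out : List Int) : Decidable (Spec_find_coprimes n limit out) := by
  unfold Spec_find_coprimes; infer_instance

-- ===== CLAIM (what is proved, stated in full; the proofs are below) =====
def Claim_equal_find_coprimes : Prop := ∀ (n : Int) (limit : Option Int), Dom_find_coprimes n limit → Pre_find_coprimes n limit → Spec_find_coprimes n limit (find_coprimes n limit)

-- ===== LEMMAS AND PROOFS =====

-- one Euclidean step preserves the gcd (Python mod, any sign of b).
theorem gcd_pymod (a b : Int) : Int.gcd b (PySem.Int.mod a b) = Int.gcd a b := by
  have h := PySem.Int.floordiv_mul_add_mod a b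
  rw [show PySem.Int.mod a b = a + b * (-(PySem.Int.floordiv a b)) from by linear_combination h]
  rw [Int.gcd_add_mul_left_right, Int.gcd_comm]

-- pygcd with enough fuel, nonnegative arguments: the true gcd.
theorem pygcd_nonneg (f : Nat) : ∀ (a b : Int), b.natAbs < f → 0 ≤ a → 0 ≤ b →
    pygcd f a b = Int.gcd a b := by
  induction f with
  | zero => intro a b hf _ _; omega
  | succ f ih =>
    intro a b hf ha hb
    rw [pygcd]
    by_cases hb0 : b = 0
    · subst hb0; rw [if_pos rfl, Int.gcd_zero_right]; omega
    · rw [if_neg hb0]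
      have hbpos : 0 < b := by omega
      have hm := PySem.Int.mod_nonneg a hbpos
      have hml := PySem.Int.mod_lt a hbpos
      rw [ih b (PySem.Int.mod a b) (by omega) hb hm, gcd_pymod]

-- stripFactor: result positive, not divisible by d, and t = d^j * result.
theorem stripFactor_spec (f : Nat) : ∀ (t d : Int), 2 ≤ d → 0 < t → t.toNat < f →
    0 < stripFactor f t d ∧ ¬ d ∣ stripFactor f t d ∧ ∃ j : Nat, t = d ^ j * stripFactor f t d := by
  induction f with
  | zero => intro t d _ ht hf; omega
  | succ f ih =>
    intro t d hd ht hf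
    rw [stripFactor]
    by_cases hm : PySem.Int.mod t d = 0
    · rw [if_pos hm]
      have hdvd : d ∣ t := (PySem.Int.mod_eq_zero_iff_dvd t d).mp hm
      have hfd : PySem.Int.floordiv t d = t / d := PySem.Int.floordiv_eq_ediv_of_pos (by omega)
      have hcancel : d * (t / d) = t := Int.mul_ediv_cancel' hdvd
      have hq : 0 < t / d := by
        rcases Int.lt_or_le 0 (t / d) with h | h
        · exact h
        · exfalso; nlinarith
      have hlt : t / d < t := by nlinarith
      obtain ⟨h1, h2, j, h3⟩ := ih (PySem.Int.floordiv t d) d hd (by omega) (by omega)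
      refine ⟨h1, h2, j + 1, ?_⟩
      rw [pow_succ, mul_comm (d ^ j) d, mul_assoc]
      rw [hfd] at h3
      calc t = d * (t / d) := hcancel.symm
        _ = d * (d ^ j * stripFactor f (PySem.Int.floordiv t d) d) := by rw [hfd, ← h3]

    · rw [if_neg hm]
      exact ⟨ht, fun hdvd => hm ((PySem.Int.mod_eq_zero_iff_dvd t d).mpr hdvd), 0, by ring⟩

-- accumulator lemma.
theorem factorOuter_acc (f : Nat) : ∀ (t d : Int) (acc : List Int),
    factorOuter f t d acc = ((factorOuter f t d []).1, acc ++ (factorOuter f t d []).2) := by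
  induction f with
  | zero => intro t d acc; simp [factorOuter]
  | succ f ih =>
    intro t d acc
    rw [factorOuter, factorOuter]
    by_cases h1 : d * d ≤ t
    · rw [if_pos h1, if_pos h1]
      by_cases h2 : PySem.Int.mod t d = 0
      · rw [if_pos h2, if_pos h2]
        rw [ih _ _ (acc ++ [d]), ih _ _ ([] ++ [d])]
        simp
      · rw [if_neg h2, if_neg h2, ih _ _ acc]
    · rw [if_neg h1, if_neg h1]; simp

-- the core invariant: the collected primes test coprimality.
theorem loop_correct (f : Nat) : ∀ (t d : Int), (t + 1 - d).toNat < f → 2 ≤ d → 1 ≤ t →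
    (∀ e : Int, 2 ≤ e → e < d → ¬ e ∣ t) → ∀ k : Int,
    ((if 1 < (factorOuter f t d []).1 then (factorOuter f t d []).2 ++ [(factorOuter f t d []).1]
      else (factorOuter f t d []).2).all (fun p => !(PySem.Int.mod k p == 0)) = true
     ↔ Int.gcd k t = 1) := by
  induction f with
  | zero => intro t d hf _ _ _ _; omega
  | succ f ih =>
    intro t d hf hd ht hnd k
    by_cases h1 : d * d ≤ t
    · have hdt : d ≤ t := le_trans (by nlinarith) h1
      by_cases h2 : PySem.Int.mod t d = 0
      · -- d divides t: d is collected, t is stripped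
        have hdvd : d ∣ t := (PySem.Int.mod_eq_zero_iff_dvd t d).mp h2
        obtain ⟨hpos, hnd', j, hjt⟩ := stripFactor_spec (t.toNat + 1) t d hd (by omega) (by omega)
        set t' := stripFactor (t.toNat + 1) t d with ht'def
        have hj1 : 0 < j := by
          rcases Nat.eq_zero_or_pos j with rfl | h
          · exfalso; rw [pow_zero, one_mul] at hjt; exact hnd' (hjt ▸ hdvd)
          · exact h
        have ht'dvd : t' ∣ t := ⟨d ^ j, by rw [hjt]; ring⟩
        have ht'le : t' ≤ t := Int.le_of_dvd (by omega) ht'dvd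
        have hdprime : Prime d := by
          rw [Int.prime_iff_natAbs_prime, Nat.prime_def_lt]
          refine ⟨by omega, fun m hmlt hmdvd => ?_⟩
          by_contra hm1
          have hm0 : m ≠ 0 := by
            rintro rfl
            have : d.natAbs = 0 := Nat.eq_zero_of_zero_dvd hmdvd
            omega
          have hm2 : 2 ≤ m := by omega
          have hmd : (m : Int) ∣ d := by
            have : (m : Int) ∣ (d.natAbs : Int) := Int.natCast_dvd_natCast.mpr hmdvd
            rwa [Int.natAbs_of_nonneg (by omega)] at this
          exact hnd m (by exact_mod_cast hm2) (by omega) (hmd.trans hdvd)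
        have hnd'' : ∀ e : Int, 2 ≤ e → e < d + 1 → ¬ e ∣ t' := by
          intro e he1 he2 hedvd
          rcases eq_or_lt_of_le (show e ≤ d by omega) with rfl | hlt
          · exact hnd' hedvd
          · exact hnd e he1 hlt (hedvd.trans ht'dvd)
        have hih := ih t' (d + 1) (by omega) (by omega) (by omega) hnd'' k
        have key : Int.gcd k t = 1 ↔ (¬ d ∣ k ∧ Int.gcd k t' = 1) := by
          rw [← Int.isCoprime_iff_gcd_eq_one, ← Int.isCoprime_iff_gcd_eq_one]
          rw [show IsCoprime k t ↔ IsCoprime k (d ^ j * t') from by rw [← hjt]]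
          rw [IsCoprime.mul_right_iff, IsCoprime.pow_right_iff hj1]
          exact and_congr (isCoprime_comm.trans hdprime.irreducible.coprime_iff_not_dvd) Iff.rfl
        rw [factorOuter, if_pos h1, if_pos h2]
        simp only [List.nil_append, ← ht'def]
        rw [factorOuter_acc f t' (d + 1) [d]]
        set r := factorOuter f t' (d + 1) [] with hrdef
        have hcomm : (if 1 < (r.1, [d] ++ r.2).1 then (r.1, [d] ++ r.2).2 ++ [(r.1, [d] ++ r.2).1]
            else (r.1, [d] ++ r.2).2) = [d] ++ (if 1 < r.1 then r.2 ++ [r.1] else r.2) := by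
          by_cases hc : 1 < r.1 <;> simp [hc]
        rw [hcomm, List.all_append, Bool.and_eq_true, hih, key]
        have hone : ([d].all (fun p => !(PySem.Int.mod k p == 0)) = true) ↔ ¬ d ∣ k := by
          simp [PySem.Int.mod_eq_zero_iff_dvd]
        rw [hone]
      · -- d does not divide t: move on
        rw [factorOuter, if_pos h1, if_neg h2]
        refine ih t (d + 1) (by omega) (by omega) ht ?_ k
        intro e he1 he2 hedvd
        rcases eq_or_lt_of_le (show e ≤ d by omega) with rfl | hlt
        · exact h2 ((PySem.Int.mod_eq_zero_iff_dvd t e).mpr hedvd)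
        · exact hnd e he1 hlt hedvd
    · -- d*d > t: loop ends; remaining t is 1 or prime
      rw [factorOuter, if_neg h1]
      by_cases ht1 : 1 < t
      · have htprime : Prime t := by
          rw [Int.prime_iff_natAbs_prime, Nat.prime_def_le_sqrt]
          refine ⟨by omega, fun m hm2 hmsqrt => ?_⟩
          have hmm : (m : Int) * m ≤ t := by
            have := Nat.le_sqrt.mp hmsqrt
            have : (↑(m * m) : Int) ≤ ↑t.natAbs := Int.ofNat_le.mpr this
            push_cast at this
            omega
          have hmd : (m : Int) < d := by nlinarith
          intro hdvdm
          refine hnd m (by exact_mod_cast hm2) hmd ?_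
          have : (m : Int) ∣ (t.natAbs : Int) := Int.natCast_dvd_natCast.mpr hdvdm
          rwa [Int.natAbs_of_nonneg (by omega)] at this
        have hco : Int.gcd k t = 1 ↔ ¬ t ∣ k := by
          rw [← Int.isCoprime_iff_gcd_eq_one]
          exact isCoprime_comm.trans htprime.irreducible.coprime_iff_not_dvd
        simp only [if_pos ht1, List.nil_append, List.all_cons, List.all_nil, Bool.and_true,
          Bool.not_eq_true', hco]
        rw [show (PySem.Int.mod k t == 0) = decide (t ∣ k) from by
          rw [Bool.eq_iff_iff]; simp [PySem.Int.mod_eq_zero_iff_dvd]]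
        simp
      · -- t = 1
        have : t = 1 := by omega
        subst this
        simp

-- ===== VERDICT (by name: the statement is the Claim_ definition above) =====
-- evaluating the predicate A tests per k, for n ≥ 1
theorem pointwise (n k : Int) (hn : 1 ≤ n) (hk : 1 ≤ k) :
    (decide (pygcd (n.natAbs + 1) k n = 1)) =
    ((if 1 < (factorOuter (n.toNat + 1) n 2 []).1
        then (factorOuter (n.toNat + 1) n 2 []).2 ++ [(factorOuter (n.toNat + 1) n 2 []).1]
        else (factorOuter (n.toNat + 1) n 2 []).2).all (fun p => !(PySem.Int.mod k p == 0))) := by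
  rw [Bool.eq_iff_iff]
  simp only [decide_eq_true_eq]
  rw [pygcd_nonneg _ k n (by omega) (by omega) (by omega)]
  rw [loop_correct (n.toNat + 1) n 2 (by omega) (by omega) (by omega)
      (fun e he1 he2 _ => by omega) k]
  omega

theorem find_coprimes_spec : Claim_equal_find_coprimes := by
  intro n limit _ hPre
  show find_coprimes n limit = find_coprimes_alt n limit
  simp only [find_coprimes, find_coprimes_alt]
  by_cases hlim : limit.getD n < 1
  · rw [if_pos hlim, PySem.List.pyRange_one_eq_nil (by omega), List.foldl_nil]
  · rw [if_neg hlim]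
    have hn0 : 0 ≤ n := by
      rcases hPre with h | h
      · exact h
      · omega
    rw [PySem.List.foldl_append_ite_eq_filter, List.nil_append]
    by_cases hn : n = 0
    · subst hn
      rw [if_pos (by norm_num)]
      rw [PySem.List.pyRange_one_cons (by omega)]
      rw [List.filter_cons_of_pos (by simp [pygcd])]
      have : (PySem.List.pyRange 2 (limit.getD 0 + 1) 1).filter
          (fun k => decide (pygcd ((0 : Int).natAbs + 1) k 0 = 1)) = [] := by
        rw [List.filter_eq_nil_iff]
        intro k hk
        have := (PySem.List.mem_pyRange_one.mp hk).1
        simp [pygcd]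
        omega
      rw [show (1:Int) + 1 = 2 from by norm_num, this]
    · have hmn : (if n < 0 then -n else n) = n := by rw [if_neg (by omega)]
      rw [hmn, if_neg hn]
      refine List.filter_congr ?_
      intro k hk
      have hk1 : 1 ≤ k := (PySem.List.mem_pyRange_one.mp hk).1
      exact pointwise n k (by omega) hk1
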